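-- pv_equiv track=rewrite | github.com/Vishal-Bhat-1/Python-Projects-ITI1120 | A3/A3_part2_300247928.py | countMembers
-- ===== SOURCE A (Python) =====
-- def countMembers(s):
--     """
--     Type: (string) -> none
--     Description: count how many times extraordinairy characters appear in a string
--     Precondition: Must be a string
--     """
--     s1 = "efghij"
--     s2 = "FGHIJKLMNOPQRSTUVWX"
--     count = 0
--     for a in (s):
--         for b in range(len(s1)-1):
--             if(a==s1[b]):
--                 count = count + 1
--         for c in range(len(s2)-1):
--             if(a==s2[c]):
--                 count = count + 1
--         if(a=="!"):
--             count = count + 1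
--         if(a==","):
--             count = count + 1
--         if(a=="\\"):
--             count = count + 1
--         for g in range(2,6):
--             if(a==str(g)):
--                 count = count + 1
--     return count
-- ===== SOURCE B (Python) =====
-- def countMembers(s):
--     # one-pass frequency table, then one pass over the fixed member set
--     # (A's len-1 loop quirks exclude 'j' and 'X' from membership)
--     members = "efghiFGHIJKLMNOPQRSTUVW!,\\2345"
--     freq = {}
--     for ch in s:
--         freq[ch] = freq.get(ch, 0) + 1
--     total = 0
--     for ch in members:
--         total += freq.get(ch, 0)
--     return total
-- ===== Notes on version B (the rewrite author's own statement) =====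
-- stated objective: faster
-- what changed: Replaces A's per-character rescans of the candidate strings (two index loops, three ifs and a str(g) loop for every input character) with a single frequency-table pass over the input followed by one pass over the fixed 30-character member set, indexing the table.
import Mathlib
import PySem

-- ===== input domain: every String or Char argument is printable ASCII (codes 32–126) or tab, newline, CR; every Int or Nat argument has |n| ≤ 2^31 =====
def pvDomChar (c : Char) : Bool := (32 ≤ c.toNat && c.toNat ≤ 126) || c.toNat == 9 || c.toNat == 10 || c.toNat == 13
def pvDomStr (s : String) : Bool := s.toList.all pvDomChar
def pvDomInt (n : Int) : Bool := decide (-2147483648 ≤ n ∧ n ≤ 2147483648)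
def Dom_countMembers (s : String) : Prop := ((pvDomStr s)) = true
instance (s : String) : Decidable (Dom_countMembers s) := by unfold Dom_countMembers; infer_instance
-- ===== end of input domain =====

-- B replaces A's per-character rescans of the candidate strings with one frequency table
-- of the input plus one pass over the fixed member set (alternative decomposition, same result).

-- ===== PORT A =====
-- loop body of A's 'for a in s' (the two index loops, the three ifs, the str(g) loop), kept literal
def pvStepA (count : Int) (a : Char) : Int :=
  let count := (PySem.List.pyRange 0 (PySem.Str.len "efghij" - 1) 1).foldl
    (fun count b => if some a == PySem.Str.pyGet? "efghij" b then count + 1 else count) count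
  let count := (PySem.List.pyRange 0 (PySem.Str.len "FGHIJKLMNOPQRSTUVWX" - 1) 1).foldl
    (fun count c => if some a == PySem.Str.pyGet? "FGHIJKLMNOPQRSTUVWX" c then count + 1 else count) count
  let count := if a == '!' then count + 1 else count
  let count := if a == ',' then count + 1 else count
  let count := if a == '\\' then count + 1 else count
  (PySem.List.pyRange 2 6 1).foldl
    (fun count g => if [a] == PySem.Int.toChars g then count + 1 else count) count

def countMembers (s : String) : Int :=
  s.toList.foldl pvStepA 0

-- ===== PORT B =====
def memberChars : List Char := "efghiFGHIJKLMNOPQRSTUVW!,\\2345".toList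

def countMembers_alt (s : String) : Int :=
  let freq : PySem.Dict Char Int :=
    s.toList.foldl (fun d ch => d.modify ch 0 (· + 1)) PySem.Dict.empty
  memberChars.foldl (fun total ch => total + freq.getD ch 0) 0

-- ===== PRECONDITION & SPEC =====
def Spec_countMembers (s : String) (out : Int) : Prop := out = countMembers_alt s
instance (s : String) (out : Int) : Decidable (Spec_countMembers s out) := by unfold Spec_countMembers; infer_instance

-- ===== CLAIM (what is proved, stated in full; the proofs are below) =====
def Claim_equal_countMembers : Prop := ∀ (s : String), Dom_countMembers s → Spec_countMembers s (countMembers s)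

-- ===== LEMMAS AND PROOFS =====

set_option maxHeartbeats 1000000 in
theorem pvStepA_eq (cnt : Int) (a : Char) :
    pvStepA cnt a = cnt + (memberChars.count a : Int) := by
  have hm : memberChars = ['e','f','g','h','i','F','G','H','I','J','K','L','M','N','O','P','Q','R','S','T','U','V','W','!',',','\\','2','3','4','5'] := rfl
  by_cases h : a ∈ memberChars
  · rw [hm] at h ⊢
    fin_cases h <;>
      simp [pvStepA, PySem.Str.pyGet?, PySem.Int.toChars, List.foldl,
        show PySem.List.pyRange 0 5 1 = ([0,1,2,3,4] : List Int) from by decide,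
        show PySem.List.pyRange 0 18 1 = ([0,1,2,3,4,5,6,7,8,9,10,11,12,13,14,15,16,17] : List Int) from by decide,
        show PySem.List.pyRange 2 6 1 = ([2,3,4,5] : List Int) from by decide,
        PySem.List.pyGet?, PySem.List.pyIdx?, Nat.toDigits, Nat.toDigitsCore, Nat.digitChar]
  · have hc : memberChars.count a = 0 := List.count_eq_zero.mpr h
    rw [hm] at h
    simp at h
    simp [pvStepA, hc, PySem.Str.pyGet?, PySem.Int.toChars, List.foldl,
      show PySem.List.pyRange 0 5 1 = ([0,1,2,3,4] : List Int) from by decide,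
      show PySem.List.pyRange 0 18 1 = ([0,1,2,3,4,5,6,7,8,9,10,11,12,13,14,15,16,17] : List Int) from by decide,
      show PySem.List.pyRange 2 6 1 = ([2,3,4,5] : List Int) from by decide,
      PySem.List.pyGet?, PySem.List.pyIdx?, Nat.toDigits, Nat.toDigitsCore, Nat.digitChar, h]

-- double-counting swap: summing members' multiplicities over s = summing s-counts over members
theorem pvSwap (l : List Char) :
    (l.map (fun a => (memberChars.count a : Int))).sum
      = (memberChars.map (fun ch => (l.count ch : Int))).sum := by
  induction l with
  | nil => simp
  | cons a t ih =>
      have : (memberChars.map (fun ch => ((a :: t).count ch : Int)))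
          = (memberChars.map (fun ch => (t.count ch : Int) + (if a == ch then 1 else 0))) := by
        apply List.map_congr_left
        intro ch _
        by_cases hac : a = ch <;> simp [hac]
      rw [List.map_cons, List.sum_cons, ih, this, PySem.List.sum_map_add_int]
      have hcnt : ((memberChars.map (fun ch => if a == ch then 1 else 0)).sum : Int)
          = (memberChars.count a : Int) := by
        rw [PySem.List.sum_map_ite_one_zero]
        congr 1
        simp [List.count, BEq.comm]
      omega

theorem countMembers_eq (s : String) :
    countMembers s = (s.toList.map (fun a => (memberChars.count a : Int))).sum := by
  unfold countMembers
  rw [show pvStepA = fun cnt a => cnt + (memberChars.count a : Int) from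
    funext fun cnt => funext fun a => pvStepA_eq cnt a]
  rw [PySem.List.foldl_add]
  simp

theorem countMembers_alt_eq (s : String) :
    countMembers_alt s = (memberChars.map (fun ch => (s.toList.count ch : Int))).sum := by
  unfold countMembers_alt
  rw [show s.toList.foldl (fun d ch => d.modify ch 0 (· + 1)) PySem.Dict.empty = PySem.Dict.counter s.toList from
    (PySem.Dict.counter_eq_foldl s.toList).symm]
  rw [PySem.List.foldl_add]
  simp [PySem.Dict.getD_counter]

-- ===== VERDICT (by name: the statement is the Claim_ definition above) =====
theorem countMembers_spec : Claim_equal_countMembers := by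
  intro s _
  unfold Spec_countMembers
  rw [countMembers_eq, countMembers_alt_eq, pvSwap]
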